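-- pv_equiv track=rewrite | github.com/TimB808/potluck_project | build/lib/potluck_code/preprocessor.py | preproc_input
-- ===== SOURCE A (Python) =====
-- import string
--
-- def remove_num(text):
--     return ''.join(char for char in text if not char.isdigit())
--
-- def remove_punct_list(ingr_list):
--     cleaned_list = []
--     for word in ingr_list:
--         for punctuation in string.punctuation:
--             word = word.replace(punctuation, '')
--         cleaned_list.append(word)
--     return cleaned_list
--
-- def preproc_input(user_input):
--     #preproces input same way as df
--
--     #1.lowercase
--     user_input = [i.lower() for i in user_input]
--
--     #2. remove numbers
--     user_input = [remove_num(i) for i in user_input]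
--
--     #3. remove spaces
--     user_input =  [i.strip() for i in user_input]
--
--     #4. remove special chars
--     user_input = remove_punct_list(user_input)
--
--     #5. join words with underscores
--     user_input = [i.replace(' ', '_') for i in user_input]
--
--     #6. add in generic ingredients (instead of removing stopwords)
--     user_input = user_input + ['water', 'salt', 'pepper']
--
--     #7. change to set -> maybe leave it for now?
--     user_input = set(user_input)
--
--     return user_input
-- ===== SOURCE B (Python) =====
-- import string
--
-- _PUNCT = frozenset(string.punctuation)
--
-- def _clean(s):
--     t = ''.join(c for c in s.lower() if not c.isdigit()).strip()
--     return ''.join('_' if c == ' ' else c for c in t if c not in _PUNCT)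
--
-- def preproc_input(user_input):
--     return set([_clean(s) for s in user_input] + ['water', 'salt', 'pepper'])
-- ===== Notes on version B (the rewrite author's own statement) =====
-- stated objective: simpler
-- what changed: Replaces A's five separate full-list passes and its 32 successive str.replace scans per word with one fused per-string cleaner that makes a single per-character filter/map pass for punctuation removal and space-to-underscore replacement.
import Mathlib
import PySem

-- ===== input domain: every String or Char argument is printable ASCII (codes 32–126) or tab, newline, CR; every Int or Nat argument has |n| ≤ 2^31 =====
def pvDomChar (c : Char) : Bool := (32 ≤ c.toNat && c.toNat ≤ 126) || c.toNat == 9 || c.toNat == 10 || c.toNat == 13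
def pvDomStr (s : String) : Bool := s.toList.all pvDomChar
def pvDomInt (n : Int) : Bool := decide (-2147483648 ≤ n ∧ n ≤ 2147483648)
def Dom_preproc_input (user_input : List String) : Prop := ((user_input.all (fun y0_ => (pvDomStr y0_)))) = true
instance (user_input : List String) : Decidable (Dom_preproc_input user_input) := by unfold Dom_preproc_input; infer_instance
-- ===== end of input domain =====

-- B fuses A's five full-list passes (and 32 str.replace scans per word) into one per-string
-- cleaner with a single per-character filter/map pass; same return value, proved below.

-- string.punctuation
def pvPunct : List Char := "!\"#$%&'()*+,-./:;<=>?@[\\]^_`{|}~".toList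

-- ===== PORT A =====
-- ''.join(char for char in text if not char.isdigit())
def remove_num (text : String) : String :=
  String.ofList (text.toList.filter (fun c => !PySem.Chars.isdigit c))

-- for word in ingr_list: for punctuation in string.punctuation: word = word.replace(punctuation,'')
def remove_punct_list (ingr_list : List String) : List String :=
  ingr_list.foldl
    (fun acc word =>
      acc ++ [pvPunct.foldl (fun w p => PySem.Str.replace w (String.ofList [p]) "") word]) []

def preproc_input (user_input : List String) : List String :=
  let u1 := user_input.map (fun i => PySem.Str.lower i)
  let u2 := u1.map (fun i => remove_num i)
  let u3 := u2.map (fun i => PySem.Str.strip i)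
  let u4 := remove_punct_list u3
  let u5 := u4.map (fun i => PySem.Str.replace i " " "_")
  PySem.Set.ofList (u5 ++ ["water", "salt", "pepper"])

-- ===== PORT B =====
-- _clean: one fused pass per string
def pvClean (s : String) : String :=
  let t := PySem.Chars.strip ((PySem.Chars.lower s.toList).filter (fun c => !PySem.Chars.isdigit c))
  String.ofList ((t.filter (fun c => !pvPunct.contains c)).map (fun c => if c = ' ' then '_' else c))

def preproc_input_alt (user_input : List String) : List String :=
  PySem.Set.ofList (user_input.map pvClean ++ ["water", "salt", "pepper"])

-- ===== PRECONDITION & SPEC =====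
def Spec_preproc_input (user_input : List String) (out : List String) : Prop := out = preproc_input_alt user_input
instance (user_input : List String) (out : List String) : Decidable (Spec_preproc_input user_input out) := by unfold Spec_preproc_input; infer_instance

-- ===== CLAIM (what is proved, stated in full; the proofs are below) =====
def Claim_equal_preproc_input : Prop := ∀ (user_input : List String), Dom_preproc_input user_input → Spec_preproc_input user_input (preproc_input user_input)

-- ===== LEMMAS AND PROOFS =====

-- replace.go with a single-char pattern is a flatMap over the characters
lemma replace_go_single (p : Char) (new : List Char) :
    ∀ (fuel : Nat) (l acc : List Char), l.length ≤ fuel →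
      PySem.Chars.replace.go [p] new fuel l acc
        = acc.reverse ++ l.flatMap (fun c => if c = p then new else [c]) := by
  intro fuel
  induction fuel with
  | zero =>
    intro l acc h
    have : l = [] := List.eq_nil_of_length_eq_zero (Nat.le_zero.mp h)
    subst this
    simp [PySem.Chars.replace.go]
  | succ n ih =>
    intro l acc h
    cases l with
    | nil => simp [PySem.Chars.replace.go]
    | cons c t =>
      simp only [PySem.Chars.replace.go]
      have ht : t.length ≤ n := by simp at h; omega
      by_cases hc : c = p
      · subst hc
        have hpre : List.isPrefixOf [c] (c :: t) = true := by
          simp [List.isPrefixOf]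
        rw [if_pos hpre]
        have hdrop : List.drop [c].length (c :: t) = t := by simp
        rw [hdrop, ih t (new.reverse ++ acc) ht]
        simp
      · have hpre : List.isPrefixOf [p] (c :: t) = false := by
          simp [List.isPrefixOf]
          exact fun hpc => hc hpc.symm
        rw [if_neg (by simp [hpre])]
        rw [ih t (c :: acc) ht]
        simp [hc]

lemma replace_single (p : Char) (new l : List Char) :
    PySem.Chars.replace l [p] new = l.flatMap (fun c => if c = p then new else [c]) := by
  unfold PySem.Chars.replace
  rw [if_neg (by simp)]
  simpa using replace_go_single p new l.length l [] (le_refl _)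

-- deleting one char is a filter
lemma replace_single_del (p : Char) (l : List Char) :
    PySem.Chars.replace l [p] [] = l.filter (fun c => !(c == p)) := by
  rw [replace_single]
  induction l with
  | nil => rfl
  | cons c t ih =>
    by_cases hc : c = p <;> simp [hc, ih]

-- replacing one char by one char is a map
lemma replace_single_map (p q : Char) (l : List Char) :
    PySem.Chars.replace l [p] [q] = l.map (fun c => if c = p then q else c) := by
  rw [replace_single]
  induction l with
  | nil => rfl
  | cons c t ih =>
    by_cases hc : c = p <;> simp [hc, ih]

-- the inner punctuation fold over Str.replace is one filter over the characters
lemma foldl_replace_punct (ps : List Char) :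
    ∀ (w : String),
      (ps.foldl (fun w p => PySem.Str.replace w (String.ofList [p]) "") w).toList
        = w.toList.filter (fun c => !ps.contains c) := by
  induction ps with
  | nil => intro w; simp
  | cons p ps ih =>
    intro w
    simp only [List.foldl_cons]
    rw [ih]
    have h1 : (PySem.Str.replace w (String.ofList [p]) "").toList
        = w.toList.filter (fun c => !(c == p)) := by
      rw [PySem.Str.toList_replace]
      simpa using replace_single_del p w.toList
    rw [h1, List.filter_filter]
    apply List.filter_congr
    intro c _
    by_cases hc : c = p <;> simp [hc]

-- remove_punct_list is a map
lemma remove_punct_list_map (l : List String) :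
    remove_punct_list l
      = l.map (fun w => pvPunct.foldl (fun w p => PySem.Str.replace w (String.ofList [p]) "") w) := by
  unfold remove_punct_list
  suffices h : ∀ (l : List String) (acc : List String),
      l.foldl (fun acc word =>
        acc ++ [pvPunct.foldl (fun w p => PySem.Str.replace w (String.ofList [p]) "") word]) acc
      = acc ++ l.map (fun w => pvPunct.foldl (fun w p => PySem.Str.replace w (String.ofList [p]) "") w) by
    simpa using h l []
  intro l
  induction l with
  | nil => intro acc; simp
  | cons w t ih => intro acc; simp [ih]

-- per-string agreement of the two pipelines
lemma clean_eq (s : String) :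
    PySem.Str.replace
        (pvPunct.foldl (fun w p => PySem.Str.replace w (String.ofList [p]) "")
          (PySem.Str.strip (remove_num (PySem.Str.lower s)))) " " "_"
      = pvClean s := by
  have h : (PySem.Str.replace
        (pvPunct.foldl (fun w p => PySem.Str.replace w (String.ofList [p]) "")
          (PySem.Str.strip (remove_num (PySem.Str.lower s)))) " " "_").toList
      = (pvClean s).toList := by
    rw [PySem.Str.toList_replace]
    have hsp : (" " : String).toList = [' '] := by decide
    have hus : ("_" : String).toList = ['_'] := by decide
    rw [hsp, hus, replace_single_map, foldl_replace_punct, PySem.Str.toList_strip]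
    have hrn : (remove_num (PySem.Str.lower s)).toList
        = (PySem.Chars.lower s.toList).filter (fun c => !PySem.Chars.isdigit c) := by
      unfold remove_num
      rw [← PySem.Str.toList_lower, String.toList_ofList]
    rw [hrn]
    simp [pvClean, String.toList_ofList]
  calc PySem.Str.replace
        (pvPunct.foldl (fun w p => PySem.Str.replace w (String.ofList [p]) "")
          (PySem.Str.strip (remove_num (PySem.Str.lower s)))) " " "_"
      = String.ofList (PySem.Str.replace
        (pvPunct.foldl (fun w p => PySem.Str.replace w (String.ofList [p]) "")
          (PySem.Str.strip (remove_num (PySem.Str.lower s)))) " " "_").toList := String.ofList_toList.symm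
    _ = String.ofList (pvClean s).toList := by rw [h]
    _ = pvClean s := String.ofList_toList

set_option maxRecDepth 4000 in
theorem preproc_input_spec : Claim_equal_preproc_input := by
  have key : ∀ (l : List String),
      (remove_punct_list (((l.map (fun i => PySem.Str.lower i)).map (fun i => remove_num i)).map (fun i => PySem.Str.strip i))).map (fun i => PySem.Str.replace i " " "_") = l.map pvClean := by
    intro l
    rw [remove_punct_list_map]
    simp only [List.map_map]
    apply List.map_congr_left
    intro s _
    simpa [Function.comp] using clean_eq s
  intro user_input _
  show _ = _
  unfold preproc_input preproc_input_alt
  exact congrArg (fun l => PySem.Set.ofList (l ++ ["water", "salt", "pepper"])) (key user_input)
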